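-- pv_equiv track=rewrite | github.com/MarshalMarks/sproutbot | main.py | format_weekday_array
-- ===== SOURCE A (Python) =====
-- def format_weekday_array(array):
--     output = []
--     for number in array:
--         if number >= 0 and number <= 6 and number not in output:
--             output.append(number)
--     output.sort()
--     output.append(output[0])
--     return output
-- ===== SOURCE B (Python) =====
-- def format_weekday_array(array):
--     vals = sorted(x for x in array if 0 <= x <= 6)
--     output = []
--     for x in vals:
--         if not output or output[-1] != x:
--             output.append(x)
--     output.append(output[0])
--     return output
-- ===== Notes on version B (the rewrite author's own statement) =====
-- stated objective: alternative
-- what changed: B filters without deduping, sorts once, then collapses adjacent duplicates in one linear pass instead of A's per-element 'not in output' membership scans before sorting.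
import Mathlib
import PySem

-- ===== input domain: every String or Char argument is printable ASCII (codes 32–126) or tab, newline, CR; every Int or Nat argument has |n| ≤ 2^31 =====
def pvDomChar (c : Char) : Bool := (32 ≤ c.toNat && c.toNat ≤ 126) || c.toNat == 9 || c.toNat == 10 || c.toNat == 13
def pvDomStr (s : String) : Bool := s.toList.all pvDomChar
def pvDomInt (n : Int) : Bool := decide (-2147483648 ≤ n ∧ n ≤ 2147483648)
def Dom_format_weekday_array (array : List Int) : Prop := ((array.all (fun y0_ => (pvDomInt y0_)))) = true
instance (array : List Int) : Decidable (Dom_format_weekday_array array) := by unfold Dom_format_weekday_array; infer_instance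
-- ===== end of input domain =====

-- B replaces A's per-element 'not in output' membership scans by sort-first and one linear
-- pass collapsing adjacent duplicates (alternative decomposition, similar cost).

-- ===== PORT A =====
def format_weekday_array (array : List Int) : List Int :=
  let output := array.foldl
    (fun output number =>
      if 0 ≤ number ∧ number ≤ 6 ∧ number ∉ output then output ++ [number] else output) []
  let output := PySem.List.sorted output (fun x => x) false
  match PySem.List.pyGet? output 0 with
  | some h => output ++ [h]
  | none => []   -- Python raises IndexError here; excluded by Pre_

-- ===== PORT B =====
def format_weekday_array_alt (array : List Int) : List Int :=
  let vals := PySem.List.sorted (array.filter fun x => decide (0 ≤ x ∧ x ≤ 6)) (fun x => x) false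
  let output := vals.foldl
    (fun output x =>
      if output = [] ∨ PySem.List.pyGetD output (-1) 0 ≠ x then output ++ [x] else output) []
  match PySem.List.pyGet? output 0 with
  | some h => output ++ [h]
  | none => []   -- Python raises IndexError here; excluded by Pre_

-- ===== PRECONDITION & SPEC =====
-- Pre_ excludes exactly the inputs with no element in 0..6, where both Pythons raise IndexError.
def Pre_format_weekday_array (array : List Int) : Prop := ∃ x ∈ array, 0 ≤ x ∧ x ≤ 6
instance (array : List Int) : Decidable (Pre_format_weekday_array array) := by unfold Pre_format_weekday_array; infer_instance
def pvWitness_format_weekday_array : List Int := [3, 3, 9, 0]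

def Spec_format_weekday_array (array : List Int) (out : List Int) : Prop := out = format_weekday_array_alt array
instance (array : List Int) (out : List Int) : Decidable (Spec_format_weekday_array array out) := by unfold Spec_format_weekday_array; infer_instance

-- ===== CLAIM (what is proved, stated in full; the proofs are below) =====
def Claim_equal_format_weekday_array : Prop := ∀ (array : List Int), Dom_format_weekday_array array → Pre_format_weekday_array array → Spec_format_weekday_array array (format_weekday_array array)

-- ===== LEMMAS AND PROOFS =====

-- A's dedup loop: the accumulator stays duplicate-free and collects exactly the kept values.
lemma foldA_inv (l acc : List Int) (h : acc.Nodup) :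
    (l.foldl (fun output number =>
        if 0 ≤ number ∧ number ≤ 6 ∧ number ∉ output then output ++ [number] else output) acc).Nodup ∧
    ∀ x, x ∈ l.foldl (fun output number =>
        if 0 ≤ number ∧ number ≤ 6 ∧ number ∉ output then output ++ [number] else output) acc ↔
      x ∈ acc ∨ (x ∈ l ∧ 0 ≤ x ∧ x ≤ 6) := by
  induction l generalizing acc with
  | nil => simp [h]
  | cons v vs ih =>
    simp only [List.foldl_cons]
    by_cases hc : 0 ≤ v ∧ v ≤ 6 ∧ v ∉ acc
    · rw [if_pos hc]
      obtain ⟨hn, hm⟩ := ih (acc ++ [v])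
        (by simp [List.nodup_append, h]
            intro a haa hav
            exact hc.2.2 (hav ▸ haa))
      refine ⟨hn, fun x => ?_⟩
      rw [hm x]
      simp only [List.mem_append, List.mem_cons]
      by_cases hxv : x = v
      · subst hxv; simp [hc.1, hc.2.1]
      · tauto
    · rw [if_neg hc]
      obtain ⟨hn, hm⟩ := ih acc h
      refine ⟨hn, fun x => ?_⟩
      rw [hm x]
      simp only [List.mem_cons]
      constructor
      · tauto
      · rintro (hx | ⟨hxm, h0, h6⟩)
        · exact Or.inl hx
        · rcases hxm with hxv | hxm
          · subst hxv
            rcases not_and_or.mp hc with h' | h'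
            · exact absurd h0 h'
            rcases not_and_or.mp h' with h' | h'
            · exact absurd h6 h'
            · exact Or.inl (not_not.mp h')
          · exact Or.inr ⟨hxm, h0, h6⟩

-- elements of a strictly increasing list are ≤ its last element
lemma le_getLast_of_pairwise_lt (acc : List Int) (h : acc.Pairwise (· < ·)) (hne : acc ≠ [])
    (a : Int) (ha : a ∈ acc) : a ≤ acc.getLast hne := by
  induction acc with
  | nil => simp at ha
  | cons b bs ih =>
    rcases List.mem_cons.mp ha with rfl | ha'
    · cases bs with
      | nil => simp
      | cons c cs =>
        have : a < (c :: cs).getLast (by simp) :=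
          (List.pairwise_cons.mp h).1 _ (List.getLast_mem _)
        rw [List.getLast_cons (by simp)]
        omega
    · cases bs with
      | nil => simp at ha'
      | cons c cs =>
        rw [List.getLast_cons (by simp)]
        exact ih (List.pairwise_cons.mp h).2 (by simp) ha'

-- B's collapsing loop: strictly increasing result with the same members.
lemma foldB_inv (vals : List Int) (hs : vals.Pairwise (· ≤ ·)) :
    ∀ acc : List Int, acc.Pairwise (· < ·) → (∀ a ∈ acc, ∀ w ∈ vals, a ≤ w) →
    (vals.foldl (fun output x =>
        if output = [] ∨ PySem.List.pyGetD output (-1) 0 ≠ x then output ++ [x] else output) acc).Pairwise (· < ·) ∧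
    ∀ x, x ∈ vals.foldl (fun output x =>
        if output = [] ∨ PySem.List.pyGetD output (-1) 0 ≠ x then output ++ [x] else output) acc ↔
      x ∈ acc ∨ x ∈ vals := by
  induction vals with
  | nil => intro acc ha _; simpa using ha
  | cons v vs ih =>
    intro acc ha hb
    have hs' := List.pairwise_cons.mp hs
    have hvle : ∀ w ∈ vs, v ≤ w := hs'.1
    simp only [List.foldl_cons]
    by_cases hemp : acc = []
    · subst hemp
      rw [if_pos (Or.inl rfl)]
      simp only [List.nil_append]
      obtain ⟨hn, hm⟩ := ih hs'.2 [v] (by simp)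
        (by intro a haa w hw; simp at haa; subst haa; exact hvle w hw)
      refine ⟨hn, fun x => ?_⟩
      rw [hm x]
      simp only [List.mem_cons, List.not_mem_nil]
      tauto
    · have hget := PySem.List.pyGetD_neg_one acc 0 hemp
      by_cases hL : acc.getLast hemp = v
      · rw [if_neg (by simp [hemp, hget, hL])]
        obtain ⟨hn, hm⟩ := ih hs'.2 acc ha
          (fun a haa w hw => le_trans (hb a haa v (by simp)) (hvle w hw))
        refine ⟨hn, fun x => ?_⟩
        rw [hm x]
        have hvmem : v ∈ acc := hL ▸ List.getLast_mem hemp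
        simp only [List.mem_cons]
        constructor
        · tauto
        · rintro (hx | hx)
          · exact Or.inl hx
          · rcases hx with hxv | hxm
            · exact Or.inl (hxv ▸ hvmem)
            · exact Or.inr hxm
      · rw [if_pos (Or.inr (by rw [hget]; exact hL))]
        have hlt : ∀ a ∈ acc, a < v := by
          intro a haa
          have h1 : a ≤ acc.getLast hemp := le_getLast_of_pairwise_lt acc ha hemp a haa
          have h2 : acc.getLast hemp ≤ v := hb _ (List.getLast_mem hemp) v (by simp)
          rcases lt_or_eq_of_le h2 with h | h
          · omega
          · exact absurd h hL
        obtain ⟨hn, hm⟩ := ih hs'.2 (acc ++ [v])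
          (by rw [List.pairwise_append]; exact ⟨ha, by simp, by simpa using hlt⟩)
          (by intro a haa w hw
              rcases List.mem_append.mp haa with h | h
              · exact le_trans (le_of_lt (hlt a h)) (hvle w hw)
              · simp at h; subst h; exact hvle w hw)
        refine ⟨hn, fun x => ?_⟩
        rw [hm x]
        simp only [List.mem_append, List.mem_cons]
        tauto

-- the two pipelines build the same sorted duplicate-free list, hence equal results
lemma core_eq (array : List Int) :
    format_weekday_array array = format_weekday_array_alt array := by
  unfold format_weekday_array format_weekday_array_alt
  obtain ⟨hdnodup, hdmem⟩ := foldA_inv array [] (by simp)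
  set d := array.foldl (fun output number =>
      if 0 ≤ number ∧ number ≤ 6 ∧ number ∉ output then output ++ [number] else output) [] with hd
  set vals := PySem.List.sorted (array.filter fun x => decide (0 ≤ x ∧ x ≤ 6)) (fun x => x) false with hv
  have hvs : vals.Pairwise (· ≤ ·) := PySem.List.sorted_pairwise _ _
  obtain ⟨hbp, hbm⟩ := foldB_inv vals hvs [] (by simp) (by simp)
  set LB := vals.foldl (fun output x =>
      if output = [] ∨ PySem.List.pyGetD output (-1) 0 ≠ x then output ++ [x] else output) [] with hLB
  have hmemiff : ∀ x, x ∈ LB ↔ x ∈ d := by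
    intro x
    rw [hbm x, hdmem x]
    simp only [List.not_mem_nil, false_or, hv, PySem.List.mem_sorted, List.mem_filter,
      decide_eq_true_eq]
  have hperm : LB.Perm d :=
    (List.perm_ext_iff_of_nodup hbp.nodup hdnodup).mpr hmemiff
  have hkey : PySem.List.sorted d (fun x => x) = LB :=
    PySem.List.sorted_eq_of_perm_of_pairwise_lt d LB (fun x => x) hperm hbp
  simp only [hkey]
  rfl

-- ===== VERDICT (by name: the statement is the Claim_ definition above) =====
theorem format_weekday_array_spec : Claim_equal_format_weekday_array := by
  intro array _ _
  unfold Spec_format_weekday_array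
  exact core_eq array
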